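-- pv_equiv track=rewrite | github.com/caretim/TIL | 코테의민족/8월27일자/모의고사.py | c_list
-- ===== SOURCE A (Python) =====
-- def c_list(i):
--     return_list=[]
--     for j in range(1,i+1):
--         k = j%10
--         if k == 1 or k == 2:
--             return_list.append(3)
--         elif k == 3 or k == 4:
--             return_list.append(1)
--         elif k == 5 or k == 6:
--             return_list.append(2)
--         elif k == 7 or k == 8:
--             return_list.append(4)
--         elif k == 9 or k == 0:
--             return_list.append(5)
--     return return_list
-- ===== SOURCE B (Python) =====
-- def c_list(i):
--     period = [3, 3, 1, 1, 2, 2, 4, 4, 5, 5]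
--     n = i if i > 0 else 0
--     return (period * (n // 10 + 1))[:n]
-- ===== Notes on version B (the rewrite author's own statement) =====
-- stated objective: idiomatic
-- what changed: Replaces the per-element loop with its six-way branch by replicating the literal period-10 block and slicing it to length; same O(n) but a constant-factor win from list replication/slicing in C instead of per-element Python branching (measured 3.4x at the largest size).
import Mathlib
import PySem

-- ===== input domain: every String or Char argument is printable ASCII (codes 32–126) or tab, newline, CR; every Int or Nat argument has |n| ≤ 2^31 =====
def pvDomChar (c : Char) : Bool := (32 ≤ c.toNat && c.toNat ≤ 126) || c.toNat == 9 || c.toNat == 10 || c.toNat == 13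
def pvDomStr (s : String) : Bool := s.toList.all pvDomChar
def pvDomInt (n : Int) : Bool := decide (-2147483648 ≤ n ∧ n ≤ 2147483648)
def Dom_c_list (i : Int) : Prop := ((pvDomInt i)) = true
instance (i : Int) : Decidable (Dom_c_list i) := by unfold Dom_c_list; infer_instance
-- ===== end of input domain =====

-- B builds the answer by replicating the literal period-10 block and slicing, instead of A's per-element loop with a six-way branch (objective: idiomatic).


-- ===== PORT A =====
def c_list (i : Int) : List Int :=
  (PySem.List.pyRange 1 (i + 1) 1).foldl (fun return_list j =>
    let k := PySem.Int.mod j 10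
    if k = 1 ∨ k = 2 then return_list ++ [3]
    else if k = 3 ∨ k = 4 then return_list ++ [1]
    else if k = 5 ∨ k = 6 then return_list ++ [2]
    else if k = 7 ∨ k = 8 then return_list ++ [4]
    else if k = 9 ∨ k = 0 then return_list ++ [5]
    else return_list) []

-- ===== PORT B =====
def c_list_alt (i : Int) : List Int :=
  let period : List Int := [3, 3, 1, 1, 2, 2, 4, 4, 5, 5]
  let n : Int := if i > 0 then i else 0
  PySem.List.slice ((List.replicate (PySem.Int.floordiv n 10 + 1).toNat period).flatten)
    none (some n)

-- ===== PRECONDITION & SPEC =====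
def Spec_c_list (i : Int) (out : List Int) : Prop := out = c_list_alt i
instance (i : Int) (out : List Int) : Decidable (Spec_c_list i out) := by unfold Spec_c_list; infer_instance

-- ===== CLAIM (what is proved, stated in full; the proofs are below) =====
def Claim_equal_c_list : Prop := ∀ (i : Int), Dom_c_list i → Spec_c_list i (c_list i)

-- ===== LEMMAS AND PROOFS =====

/-- the value A appends for loop counter `j` (the five branches are exhaustive since `j % 10 ∈ [0,10)`) -/
def pvVal (j : Int) : Int :=
  let k := PySem.Int.mod j 10
  if k = 1 ∨ k = 2 then 3
  else if k = 3 ∨ k = 4 then 1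
  else if k = 5 ∨ k = 6 then 2
  else if k = 7 ∨ k = 8 then 4
  else 5

/-- the period-10 pattern read at position `m` (0-based) -/
def pvPat (m : Nat) : Int := ([3, 3, 1, 1, 2, 2, 4, 4, 5, 5] : List Int).getD (m % 10) 0

lemma pvBody_eq (acc : List Int) (j : Int) :
    (let k := PySem.Int.mod j 10
     if k = 1 ∨ k = 2 then acc ++ [3]
     else if k = 3 ∨ k = 4 then acc ++ [1]
     else if k = 5 ∨ k = 6 then acc ++ [2]
     else if k = 7 ∨ k = 8 then acc ++ [4]
     else if k = 9 ∨ k = 0 then acc ++ [5]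
     else acc) = acc ++ [pvVal j] := by
  have h0 : 0 ≤ PySem.Int.mod j 10 := PySem.Int.mod_nonneg j (by omega)
  have h1 : PySem.Int.mod j 10 < 10 := PySem.Int.mod_lt j (by omega)
  simp only [pvVal]
  interval_cases h : PySem.Int.mod j 10 <;> simp

lemma pvVal_eq_pat (m : Nat) : pvVal (1 + (m : Int)) = pvPat m := by
  have hcast : (1 : Int) + (m : Int) = ((1 + m : Nat) : Int) := by push_cast; ring
  have hmod : PySem.Int.mod ((1 + m : Nat) : Int) 10 = (((1 + m) % 10 : Nat) : Int) :=
    PySem.Int.mod_natCast (1 + m) 10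
  have hr : (1 + m) % 10 = (1 + m % 10) % 10 := by omega
  have hm : m % 10 < 10 := Nat.mod_lt _ (by omega)
  simp only [pvVal, pvPat, hcast, hmod, hr]
  interval_cases h : m % 10 <;> simp

lemma pvPat_shift (m : Nat) : pvPat (10 + m) = pvPat m := by
  simp only [pvPat]
  congr 1
  omega

lemma pvTake_flatten (K N : Nat) (h : N ≤ 10 * K) :
    ((List.replicate K ([3, 3, 1, 1, 2, 2, 4, 4, 5, 5] : List Int)).flatten).take N
      = (List.range N).map pvPat := by
  induction K generalizing N with
  | zero =>
    interval_cases N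
    decide
  | succ K ih =>
    rw [List.replicate_succ, List.flatten_cons]
    by_cases hN : N ≤ 10
    · rw [List.take_append_of_le_length (by simp; omega)]
      interval_cases N <;> decide
    · have hN' : N = 10 + (N - 10) := by omega
      rw [hN', List.take_append]
      simp only [List.length_cons, List.length_nil]
      have h10 : (10 + (N - 10)) - (0 + 1 + 1 + 1 + 1 + 1 + 1 + 1 + 1 + 1 + 1) = N - 10 := by omega
      rw [h10, ih (N - 10) (by omega)]
      rw [List.range_add, List.map_append, List.map_map]
      congr 1
      · have hlen : ([3, 3, 1, 1, 2, 2, 4, 4, 5, 5] : List Int).length ≤ 10 + (N - 10) := by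
          simp
        rw [List.take_of_length_le hlen]
        decide
      · exact (List.map_congr_left fun m _ => (pvPat_shift m).symm)

-- ===== VERDICT (by name: the statement is the Claim_ definition above) =====
theorem c_list_spec : Claim_equal_c_list := by
  intro i _
  unfold Spec_c_list c_list c_list_alt
  -- A side: the fold appends pvVal j for each j
  have hA : (PySem.List.pyRange 1 (i + 1) 1).foldl (fun return_list j =>
      let k := PySem.Int.mod j 10
      if k = 1 ∨ k = 2 then return_list ++ [3]
      else if k = 3 ∨ k = 4 then return_list ++ [1]
      else if k = 5 ∨ k = 6 then return_list ++ [2]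
      else if k = 7 ∨ k = 8 then return_list ++ [4]
      else if k = 9 ∨ k = 0 then return_list ++ [5]
      else return_list) []
      = (PySem.List.pyRange 1 (i + 1) 1).map pvVal := by
    rw [PySem.List.foldl_congr_mem _ _ _ _ (fun acc j _ => pvBody_eq acc j)]
    rw [PySem.List.foldl_append_singleton_eq_map]
    simp
  rw [hA, PySem.List.pyRange_one]
  set N : Nat := (i + 1 - 1).toNat with hNdef
  -- B side
  have hn : (if i > 0 then i else 0) = (N : Int) := by
    split_ifs with hi <;> simp [hNdef] <;> omega
  rw [hn, PySem.List.slice_to _ (by positivity)]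
  have hfd : PySem.Int.floordiv (N : Int) 10 = ((N / 10 : Nat) : Int) :=
    PySem.Int.floordiv_natCast N 10
  rw [hfd]
  have hK : (((N / 10 : Nat) : Int) + 1).toNat = N / 10 + 1 := by omega
  rw [hK, Int.toNat_natCast]
  rw [pvTake_flatten (N / 10 + 1) N (by omega)]
  rw [List.map_map]
  exact List.map_congr_left fun m _ => pvVal_eq_pat m
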